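-- pv_equiv track=rewrite | github.com/dfint/df-translation-toolkit | df_translation_toolkit/parse/parse_raws.py | tokenize_raw_file
-- ===== SOURCE A (Python) =====
-- from collections.abc import Callable, Iterable, Iterator, Mapping, Sequence
-- from typing import NamedTuple, TypeVar
--
-- def iterate_tags(s: str) -> Iterator[str]:
--     tag_start = None
--     for i, char in enumerate(s):
--         if tag_start is None:
--             if char == "[":
--                 tag_start = i
--         elif char == "]":
--             yield s[tag_start : i + 1]
--             tag_start = None
--
-- class RawFileToken(NamedTuple):
--     line_number: int
--     is_tag: bool
--     text: str
--
-- def tokenize_raw_file(file: Iterable[str]) -> Iterator[RawFileToken]: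
--     for i, line in enumerate(file, 1):
--         if "[" not in line:
--             yield RawFileToken(i, is_tag=False, text=line.rstrip())
--         else:
--             line_start = line.partition("[")[0]
--             yield RawFileToken(i, is_tag=False, text=line_start)
--             yield from (RawFileToken(i, is_tag=True, text=tag) for tag in iterate_tags(line))
-- ===== SOURCE B (Python) =====
-- from typing import NamedTuple
-- from collections.abc import Iterable, Iterator
--
--
-- class RawFileToken(NamedTuple):
--     line_number: int
--     is_tag: bool
--     text: str
--
--
-- def tokenize_raw_file(file: Iterable[str]) -> Iterator[RawFileToken]:
--     for i, line in enumerate(file, 1):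
--         if "[" not in line:
--             yield RawFileToken(i, is_tag=False, text=line.rstrip())
--         else:
--             yield RawFileToken(i, is_tag=False, text=line.partition("[")[0])
--             # tags chunk-wise: split on ']'; each ']' closes a tag iff a '['
--             # was seen since the previous closed tag
--             buf = ""
--             for chunk in line.split("]")[:-1]:
--                 buf += chunk
--                 j = buf.find("[")
--                 if j != -1:
--                     yield RawFileToken(i, is_tag=True, text=buf[j:] + "]")
--                     buf = ""
-- ===== Notes on version B (the rewrite author's own statement) =====
-- stated objective: alternative
-- what changed: A's per-character state-machine generator over each line is replaced by splitting the line on ']' and scanning chunks: a buffer of text since the last closed tag is kept and each ']' closes a tag iff the buffer contains a '['; the per-character loop and the tag_start index disappear.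
import Mathlib
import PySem

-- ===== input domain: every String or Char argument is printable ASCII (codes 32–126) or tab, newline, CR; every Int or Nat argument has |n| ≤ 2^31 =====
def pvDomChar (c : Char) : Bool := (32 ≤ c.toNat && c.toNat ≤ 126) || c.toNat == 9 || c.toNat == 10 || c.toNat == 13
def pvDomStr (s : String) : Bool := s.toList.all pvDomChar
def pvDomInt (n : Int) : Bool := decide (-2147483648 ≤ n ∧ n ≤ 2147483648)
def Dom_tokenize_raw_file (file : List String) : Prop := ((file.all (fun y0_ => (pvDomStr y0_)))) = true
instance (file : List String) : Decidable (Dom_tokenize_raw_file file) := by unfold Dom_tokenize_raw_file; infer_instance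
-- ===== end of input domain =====

-- B replaces A's character-by-character state-machine tag scanner by a split-on-']'
-- chunk scan (each ']' closes a tag iff a '[' appeared since the last closed tag);
-- objective: alternative (same asymptotic cost, different traversal).

-- ===== PORT A =====

-- port of line.partition("[")[0] (partition is not in PySem; exact: Python returns
-- s[:idx] of the first occurrence when the separator is found, else the whole s)
def pyPartitionFst (s : List Char) : List Char :=
  let f := PySem.Chars.find s ['[']
  if f = -1 then s else List.take f.toNat s

-- the for-loop of iterate_tags: state tag_start : Option Int, yields s[tag_start:i+1]
def iterateTagsGo (s : List Char) : List (Int × Char) → Option Int → List (List Char)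
  | [], _ => []
  | (i, c) :: rest, none =>
      if c = '[' then iterateTagsGo s rest (some i) else iterateTagsGo s rest none
  | (i, c) :: rest, some t =>
      if c = ']' then PySem.Chars.slice s (some t) (some (i + 1)) :: iterateTagsGo s rest none
      else iterateTagsGo s rest (some t)

def iterate_tags (s : List Char) : List (List Char) :=
  iterateTagsGo s (PySem.List.enumerate s 0) none

def tokenize_raw_file (file : List String) : List (Int × Bool × String) :=
  (PySem.List.enumerate file 1).foldl (fun acc p =>
    let line := p.2.toList
    if !(PySem.Chars.isIn ['['] line) then
      acc ++ [(p.1, false, String.ofList (PySem.Chars.rstrip line))]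
    else
      acc ++ [(p.1, false, String.ofList (pyPartitionFst line))]
          ++ (iterate_tags line).map (fun t => (p.1, true, String.ofList t))) []

-- ===== PORT B =====

-- the chunk loop of B: buf accumulates ']'-free text since the last closed tag
def tagsBGo : List (List Char) → List Char → List (List Char)
  | [], _ => []
  | chunk :: rest, buf =>
      let buf' := buf ++ chunk
      let j := PySem.Chars.find buf' ['[']
      if j = -1 then tagsBGo rest buf'
      else (PySem.Chars.slice buf' (some j) none ++ [']']) :: tagsBGo rest []

def tagsB (line : List Char) : List (List Char) :=
  tagsBGo ((PySem.Chars.splitOn line [']']).dropLast) []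

def tokenize_raw_file_alt (file : List String) : List (Int × Bool × String) :=
  (PySem.List.enumerate file 1).flatMap (fun p =>
    let line := p.2.toList
    if !(PySem.Chars.isIn ['['] line) then
      [(p.1, false, String.ofList (PySem.Chars.rstrip line))]
    else
      (p.1, false, String.ofList (pyPartitionFst line))
        :: (tagsB line).map (fun t => (p.1, true, String.ofList t)))

-- ===== PRECONDITION & SPEC =====
def Spec_tokenize_raw_file (file : List String) (out : List (Int × Bool × String)) : Prop := out = tokenize_raw_file_alt file
instance (file : List String) (out : List (Int × Bool × String)) : Decidable (Spec_tokenize_raw_file file out) := by unfold Spec_tokenize_raw_file; infer_instance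

-- ===== CLAIM (what is proved, stated in full; the proofs are below) =====
def Claim_equal_tokenize_raw_file : Prop := ∀ (file : List String), Dom_tokenize_raw_file file → Spec_tokenize_raw_file file (tokenize_raw_file file)

-- ===== LEMMAS AND PROOFS =====

-- reference scanner: state = none (outside a tag) / some acc (inside, acc = chars so far incl '[')
def scan : List Char → Option (List Char) → List (List Char)
  | [], _ => []
  | c :: rest, none => if c = '[' then scan rest (some ['[']) else scan rest none
  | c :: rest, some a => if c = ']' then (a ++ [']']) :: scan rest none else scan rest (some (a ++ [c]))

-- structural version of splitting on ']'
def mySplit : List Char → List (List Char)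
  | [] => [[]]
  | c :: r =>
      if c = ']' then [] :: mySplit r
      else match mySplit r with
           | [] => [[c]]
           | h :: t => (c :: h) :: t

def consFst (p : List Char) : List (List Char) → List (List Char)
  | [] => [p]
  | h :: t => (p ++ h) :: t

def joinR (L : List (List Char)) : List Char := (L.map (· ++ [']'])).flatten

def stateOf : List Char → Option (List Char)
  | [] => none
  | c :: w => if c = '[' then some (c :: w) else stateOf w

lemma mySplit_ne_nil (l : List Char) : mySplit l ≠ [] := by
  induction l with
  | nil => simp [mySplit]
  | cons c r ih =>
    simp only [mySplit]
    split
    · simp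
    · cases h : mySplit r <;> simp

lemma mySplit_no_rb (l : List Char) : ∀ w ∈ mySplit l, ']' ∉ w := by
  induction l with
  | nil => simp [mySplit]
  | cons c r ih =>
    rcases hsp : mySplit r with - | ⟨h, t⟩
    · exact absurd hsp (mySplit_ne_nil r)
    intro w hw
    simp only [mySplit, hsp] at hw
    split at hw
    · rcases List.mem_cons.1 hw with rfl | hw
      · simp
      · exact ih w (hsp ▸ hw)
    · rename_i hc
      rcases List.mem_cons.1 hw with rfl | hw
      · intro hmem
        rcases List.mem_cons.1 hmem with rfl | hmem
        · exact hc rfl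
        · exact ih h (hsp ▸ List.mem_cons_self ..) hmem
      · exact ih w (hsp ▸ List.mem_cons_of_mem _ hw)

lemma splitOn_go (fuel : Nat) : ∀ (l cur : List Char) (acc : List (List Char)), l.length < fuel →
    PySem.Chars.splitOn.go [']'] fuel l cur acc = acc.reverse ++ consFst cur.reverse (mySplit l) := by
  induction fuel with
  | zero => intro l cur acc h; omega
  | succ fuel ih =>
    intro l cur acc h
    cases l with
    | nil =>
      simp [PySem.Chars.splitOn.go, mySplit, consFst]
    | cons c rest =>
      rw [PySem.Chars.splitOn.go]
      by_cases hc : c = ']'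
      · subst hc
        rw [if_pos (by simp [List.isPrefixOf])]
        simp only [List.length_cons, List.length_nil, List.drop_succ_cons, List.drop_zero]
        rw [ih rest [] (cur.reverse :: acc) (by simpa using h)]
        rcases hsp : mySplit rest with - | ⟨h1, t1⟩
        · exact absurd hsp (mySplit_ne_nil rest)
        · simp [mySplit, hsp, consFst]
      · rw [if_neg (by simp [List.isPrefixOf]; intro hh; exact absurd hh.symm hc)]
        rw [ih rest (c :: cur) acc (by simpa using h)]
        rcases hsp : mySplit rest with - | ⟨h1, t1⟩
        · exact absurd hsp (mySplit_ne_nil rest)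
        · simp [mySplit, hsp, consFst, if_neg hc]

lemma splitOn_eq (l : List Char) : PySem.Chars.splitOn l [']'] = mySplit l := by
  rw [PySem.Chars.splitOn, splitOn_go (l.length + 1) l [] [] (by omega)]
  rcases hsp : mySplit l with - | ⟨h1, t1⟩
  · exact absurd hsp (mySplit_ne_nil l)
  · simp [consFst]

lemma mySplit_join (l : List Char) : ∀ I t, mySplit l = I ++ [t] → l = joinR I ++ t := by
  induction l with
  | nil =>
    intro I t h
    simp only [mySplit] at h
    cases I with
    | nil => simp at h; simp [joinR, h]
    | cons a I' => simp at h
  | cons c r ih =>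
    intro I t h
    simp only [mySplit] at h
    split at h
    · rename_i hc
      cases I with
      | nil =>
        exfalso
        apply mySplit_ne_nil r
        have := congrArg List.tail h
        simpa using this
      | cons a I' =>
        simp at h
        obtain ⟨rfl, h2⟩ := h
        subst hc
        have := ih I' t h2
        simp [joinR] at this ⊢
        exact this
    · rename_i hc
      rcases hsp : mySplit r with - | ⟨h1, t1⟩
      · exact absurd hsp (mySplit_ne_nil r)
      rw [hsp] at h
      cases I with
      | nil =>
        simp at h
        obtain ⟨rfl, rfl⟩ := h
        have := ih [] h1 (by rw [hsp]; simp)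
        simp [joinR] at this ⊢
        exact this
      | cons a I' =>
        simp at h
        obtain ⟨rfl, h2⟩ := h
        have := ih (h1 :: I') t (by rw [hsp, h2]; simp)
        simp [joinR] at this ⊢
        simp [this]

lemma scan_nil_of_no_rb (u : List Char) (st : Option (List Char)) (h : ']' ∉ u) : scan u st = [] := by
  induction u generalizing st with
  | nil => cases st <;> rfl
  | cons c rest ih =>
    have hc : c ≠ ']' := fun hh => h (by simp [hh])
    cases st with
    | none =>
      simp only [scan]
      split <;> exact ih _ (fun hm => h (List.mem_cons_of_mem _ hm))
    | some a =>
      simp only [scan]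
      rw [if_neg hc]
      exact ih _ (fun hm => h (List.mem_cons_of_mem _ hm))

lemma scan_acc (w : List Char) (h : ']' ∉ w) : ∀ z a, scan (w ++ z) (some a) = scan z (some (a ++ w)) := by
  induction w with
  | nil => simp
  | cons c w' ih =>
    intro z a
    have hc : c ≠ ']' := fun hh => h (by simp [hh])
    simp only [List.cons_append, scan, if_neg hc]
    rw [ih (fun hm => h (List.mem_cons_of_mem _ hm)) z (a ++ [c])]
    simp

lemma scan_block (w : List Char) (h : ']' ∉ w) : ∀ z, scan (w ++ z) none = scan z (stateOf w) := by
  induction w with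
  | nil => intro z; rfl
  | cons c w' ih =>
    intro z
    have hc : c ≠ ']' := fun hh => h (by simp [hh])
    have h' : (']' : Char) ∉ w' := fun hm => h (List.mem_cons_of_mem _ hm)
    simp only [List.cons_append, scan, stateOf]
    split
    · rename_i hc2
      rw [scan_acc w' h' z ['[']]
      subst hc2
      rfl
    · exact ih h' z

lemma stateOf_none_iff (w : List Char) : stateOf w = none ↔ '[' ∉ w := by
  induction w with
  | nil => simp [stateOf]
  | cons c w' ih =>
    simp only [stateOf]
    split
    · rename_i hc; subst hc; simp
    · rename_i hc
      have hne : ('[' : Char) ≠ c := fun hh => hc hh.symm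
      simp [ih, List.mem_cons, hne]

lemma stateOf_first (w : List Char) : ∀ j (hj : j < w.length), w[j] = '[' → (∀ i (hi : i < j), w[i]'(by omega) ≠ '[') → stateOf w = some (w.drop j) := by
  induction w with
  | nil => intro j hj; exact absurd hj (by simp)
  | cons c w' ih =>
    intro j hj hget hmin
    cases j with
    | zero =>
      simp at hget
      simp [stateOf, hget]
    | succ j' =>
      have hc : c ≠ '[' := by
        have := hmin 0 (Nat.succ_pos _)
        simpa using this
      simp only [stateOf, if_neg hc, List.drop_succ_cons]
      exact ih j' (by simpa using hj) (by simpa using hget)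
        (fun i hi => by have := hmin (i+1) (by omega); simpa using this)

lemma stateOf_find (w : List Char) (h : '[' ∈ w) :
    0 ≤ PySem.Chars.find w ['['] ∧ stateOf w = some (w.drop (PySem.Chars.find w ['[']).toNat) := by
  have h0 : 0 ≤ PySem.Chars.find w ['['] :=
    (PySem.Chars.find_nonneg_iff w ['[']).2 ((List.singleton_infix_iff '[' w).2 h)
  obtain ⟨hpre, hmin⟩ := PySem.Chars.find_spec h0
  set j := (PySem.Chars.find w ['[']).toNat with hj
  have hjlt : j < w.length := by
    have h1 : 1 ≤ (w.drop j).length := hpre.length_le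
    simp at h1
    omega
  have hget : w[j] = '[' := by
    have := hpre.getElem (i := 0) (by simp)
    simpa [List.getElem_drop] using this.symm
  refine ⟨h0, stateOf_first w j hjlt hget ?_⟩
  intro i hi hgi
  apply hmin i hi
  have hi' : i < w.length := by omega
  rw [List.drop_eq_getElem_cons hi', hgi]
  exact ⟨_, rfl⟩

lemma iterA (u : List Char) : ∀ (s : List Char) (k : Nat), s.drop k = u →
    (iterateTagsGo s (PySem.List.enumerate u (k : Int)) none = scan u none) ∧
    (∀ (t : Nat) (a : List Char), s.drop t = a ++ u → t + a.length = k →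
      iterateTagsGo s (PySem.List.enumerate u (k : Int)) (some (t : Int)) = scan u (some a)) := by
  induction u with
  | nil =>
    intro s k hk
    refine ⟨rfl, fun t a _ _ => rfl⟩
  | cons c u' ih =>
    intro s k hk
    have hdrop : s.drop (k + 1) = u' := by
      have : List.drop 1 (List.drop k s) = List.drop (k + 1) s := by
        rw [List.drop_drop]
      rw [← this, hk]
      simp
    have hcast : (k : Int) + 1 = ((k + 1 : Nat) : Int) := by push_cast; ring
    constructor
    · rw [PySem.List.enumerate_cons]
      simp only [iterateTagsGo, scan]
      split
      · rename_i hc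
        rw [hcast]
        exact (ih s (k + 1) hdrop).2 k ['['] (by rw [hk, hc]; rfl) (by simp)
      · rw [hcast]
        exact (ih s (k + 1) hdrop).1
    · intro t a ha hta
      rw [PySem.List.enumerate_cons]
      simp only [iterateTagsGo, scan]
      split
      · rename_i hc
        subst hc
        congr 1
        · rw [PySem.Chars.slice_eq_listSlice, hcast, PySem.List.slice_natCast, ha]
          have hlen : k + 1 - t = a.length + 1 := by omega
          rw [hlen]
          simp [List.take_append]
        · rw [hcast]
          exact (ih s (k + 1) hdrop).1
      · rename_i hc
        rw [hcast]
        exact (ih s (k + 1) hdrop).2 t (a ++ [c]) (by rw [ha]; simp) (by simp; omega)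

lemma tagsBGo_eq (L : List (List Char)) : ∀ (tail buf : List Char),
    (∀ w ∈ L, ']' ∉ w) → ']' ∉ tail → ']' ∉ buf → '[' ∉ buf →
    tagsBGo L buf = scan (buf ++ (joinR L ++ tail)) none := by
  induction L with
  | nil =>
    intro tail buf _ htail hbuf _
    rw [scan_nil_of_no_rb _ _ (by simp [joinR]; exact ⟨hbuf, htail⟩)]
    rfl
  | cons chunk rest ih =>
    intro tail buf hL htail hbuf hbufl
    have hch : (']' : Char) ∉ chunk := hL chunk (List.mem_cons_self ..)
    have hbuf' : (']' : Char) ∉ buf ++ chunk := by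
      intro hm; rcases List.mem_append.1 hm with h | h
      exacts [hbuf h, hch h]
    have hre : buf ++ (joinR (chunk :: rest) ++ tail) = (buf ++ chunk) ++ (']' :: (joinR rest ++ tail)) := by
      simp [joinR]
    rw [hre, scan_block _ hbuf']
    simp only [tagsBGo]
    by_cases hmem : '[' ∈ buf ++ chunk
    · obtain ⟨hfind0, hst⟩ := stateOf_find _ hmem
      obtain ⟨n, hn⟩ : ∃ n : Nat, PySem.Chars.find (buf ++ chunk) ['['] = (n : Int) :=
        ⟨(PySem.Chars.find (buf ++ chunk) ['[']).toNat, (Int.toNat_of_nonneg hfind0).symm⟩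
      rw [hn] at hst ⊢
      simp only [Int.toNat_natCast] at hst
      rw [if_neg (by omega), hst]
      simp only [scan]
      congr 1
      · rw [PySem.Chars.slice_eq_listSlice, PySem.List.slice_from_natCast]
      · have := ih tail [] (fun w hw => hL w (List.mem_cons_of_mem _ hw)) htail (by simp) (by simp)
        exact this
    · have hfind : PySem.Chars.find (buf ++ chunk) ['['] = -1 :=
        (PySem.Chars.find_eq_neg_one_iff _ _).2 (fun hinf => hmem ((List.singleton_infix_iff '[' _).1 hinf))
      rw [if_pos hfind]
      have hstep : scan ((']' : Char) :: (joinR rest ++ tail)) none = scan (joinR rest ++ tail) none := by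
        simp [scan]
      rw [(stateOf_none_iff _).2 hmem, hstep,
        ih tail (buf ++ chunk) (fun w hw => hL w (List.mem_cons_of_mem _ hw)) htail hbuf' hmem]
      rw [scan_block _ hbuf', (stateOf_none_iff _).2 hmem]

lemma tags_eq (l : List Char) : iterate_tags l = tagsB l := by
  have hA : iterate_tags l = scan l none := by
    have := (iterA l l 0 (by simp)).1
    simpa [iterate_tags] using this
  have hne := mySplit_ne_nil l
  have hdecomp : mySplit l = (mySplit l).dropLast ++ [(mySplit l).getLast hne] :=
    (List.dropLast_append_getLast hne).symm
  have hjoin := mySplit_join l _ _ hdecomp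
  have hparts : ∀ w ∈ (mySplit l).dropLast, ']' ∉ w :=
    fun w hw => mySplit_no_rb l w ((List.dropLast_sublist _).subset hw)
  have htail : (']' : Char) ∉ (mySplit l).getLast hne :=
    mySplit_no_rb l _ (List.getLast_mem hne)
  have hB : tagsB l = scan l none := by
    rw [tagsB, splitOn_eq,
      tagsBGo_eq _ _ [] hparts htail (by simp) (by simp)]
    rw [List.nil_append, ← hjoin]
  rw [hA, hB]

-- ===== VERDICT (by name: the statement is the Claim_ definition above) =====
theorem tokenize_raw_file_spec : Claim_equal_tokenize_raw_file := by
  intro file _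
  show tokenize_raw_file file = tokenize_raw_file_alt file
  rw [tokenize_raw_file, tokenize_raw_file_alt]
  have hfun : (fun (acc : List (Int × Bool × String)) (p : Int × String) =>
      let line := p.2.toList
      if !(PySem.Chars.isIn ['['] line) then
        acc ++ [(p.1, false, String.ofList (PySem.Chars.rstrip line))]
      else
        acc ++ [(p.1, false, String.ofList (pyPartitionFst line))]
            ++ (iterate_tags line).map (fun t => (p.1, true, String.ofList t)))
      = (fun acc p =>
      acc ++ (let line := p.2.toList
        if !(PySem.Chars.isIn ['['] line) then
          [(p.1, false, String.ofList (PySem.Chars.rstrip line))]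
        else
          (p.1, false, String.ofList (pyPartitionFst line))
            :: (tagsB line).map (fun t => (p.1, true, String.ofList t)))) := by
    funext acc p
    simp only []
    split
    · rfl
    · rw [tags_eq]
      simp
  rw [hfun, PySem.List.foldl_append_eq_flatMap]
  simp
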